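-- pv_equiv track=rewrite | github.com/glotzerlab/hoomd-blue | hoomd/output/csv_backend.py | _determine_header
-- ===== SOURCE A (Python) =====
-- def _determine_header(namespace, sep, max_len):
--     index = -1
--     char_count = 0
--     for name in reversed(namespace[:-1]):
--         if char_count + len(name) > max_len:
--             break
--         index -= 1
--     return sep.join(namespace[index:])
-- ===== SOURCE B (Python) =====
-- def _determine_header(namespace, sep, max_len):
--     start = 0
--     for i, name in enumerate(namespace[:-1]):
--         if len(name) > max_len:
--             start = i + 1
--     return sep.join(namespace[start:])
-- ===== Notes on version B (the rewrite author's own statement) =====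
-- stated objective: simpler
-- what changed: Replaces the backward reversed-scan with break and a negative running index by a single forward enumerate pass that records the position after the last over-long component, then joins the plain non-negative-index suffix.
import Mathlib
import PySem

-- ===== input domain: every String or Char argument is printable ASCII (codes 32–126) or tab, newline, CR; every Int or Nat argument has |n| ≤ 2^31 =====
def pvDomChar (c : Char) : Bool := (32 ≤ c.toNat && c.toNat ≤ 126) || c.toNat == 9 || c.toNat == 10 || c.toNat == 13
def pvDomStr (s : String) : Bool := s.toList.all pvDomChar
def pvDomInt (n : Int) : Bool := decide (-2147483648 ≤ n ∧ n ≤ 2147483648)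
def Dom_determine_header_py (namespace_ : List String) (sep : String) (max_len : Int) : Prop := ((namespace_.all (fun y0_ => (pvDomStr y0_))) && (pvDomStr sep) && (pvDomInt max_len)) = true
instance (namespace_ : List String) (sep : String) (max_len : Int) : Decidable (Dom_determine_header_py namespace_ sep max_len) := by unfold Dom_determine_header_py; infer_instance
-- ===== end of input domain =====

-- B replaces A's backward reversed-scan with break (negative running index) by one forward
-- enumerate pass recording the position after the last over-long component; objective: simpler.

-- ===== PORT A =====
-- the 'for name in reversed(namespace[:-1])' loop with its break; state (index, char_count)
def pvALoop (max_len : Int) : List String → Int → Int → Int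
  | [], index, _ => index
  | name :: rest, index, char_count =>
      if char_count + PySem.Str.len name > max_len then index
      else pvALoop max_len rest (index - 1) char_count

def determine_header_py (namespace_ : List String) (sep : String) (max_len : Int) : String :=
  PySem.Str.join sep (PySem.List.slice namespace_
    (some (pvALoop max_len (PySem.List.slice namespace_ none (some (-1))).reverse (-1) 0)) none)

-- ===== PORT B =====
def determine_header_py_alt (namespace_ : List String) (sep : String) (max_len : Int) : String :=
  PySem.Str.join sep (PySem.List.slice namespace_
    (some ((PySem.List.enumerate (PySem.List.slice namespace_ none (some (-1)))).foldl
      (fun start p => if PySem.Str.len p.2 > max_len then p.1 + 1 else start) 0)) none)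

-- ===== PRECONDITION & SPEC =====
def Spec_determine_header_py (namespace_ : List String) (sep : String) (max_len : Int) (out : String) : Prop := out = determine_header_py_alt namespace_ sep max_len
instance (namespace_ : List String) (sep : String) (max_len : Int) (out : String) : Decidable (Spec_determine_header_py namespace_ sep max_len out) := by unfold Spec_determine_header_py; infer_instance

-- ===== CLAIM (what is proved, stated in full; the proofs are below) =====
def Claim_equal_determine_header_py : Prop := ∀ (namespace_ : List String) (sep : String) (max_len : Int), Dom_determine_header_py namespace_ sep max_len → Spec_determine_header_py namespace_ sep max_len (determine_header_py namespace_ sep max_len)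

-- ===== LEMMAS AND PROOFS =====

-- a name is "good" when it survives A's break test (char_count is always 0 in A)
def pvGood (max_len : Int) (nm : String) : Bool := !decide (PySem.Str.len nm > max_len)

-- length of the maximal all-good suffix of l
def pvT (max_len : Int) (l : List String) : Nat := (l.reverse.takeWhile (pvGood max_len)).length

lemma pvT_le (max_len : Int) (l : List String) : pvT max_len l ≤ l.length := by
  have h := (List.takeWhile_sublist (l := l.reverse) (p := pvGood max_len)).length_le
  simpa [pvT] using h

lemma pvT_all (max_len : Int) (l : List String) (hall : l.all (pvGood max_len) = true) :
    pvT max_len l = l.length := by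
  have hself : l.reverse.takeWhile (pvGood max_len) = l.reverse :=
    List.takeWhile_eq_self_iff.mpr
      (fun y hy => (List.all_eq_true.mp hall) y (List.mem_reverse.mp hy))
  simp [pvT, hself]

lemma pvT_cons (max_len : Int) (x : String) (xs : List String) :
    pvT max_len (x :: xs) =
      if xs.all (pvGood max_len) = true then
        xs.length + (if pvGood max_len x = true then 1 else 0)
      else pvT max_len xs := by
  simp only [pvT, List.reverse_cons, List.takeWhile_append]
  by_cases hall : xs.all (pvGood max_len) = true
  · have hself : xs.reverse.takeWhile (pvGood max_len) = xs.reverse :=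
      List.takeWhile_eq_self_iff.mpr
        (fun y hy => (List.all_eq_true.mp hall) y (List.mem_reverse.mp hy))
    rw [if_pos (by rw [hself]), if_pos hall]
    simp only [List.takeWhile_cons, List.takeWhile_nil, List.length_append, List.length_reverse]
    split_ifs <;> simp
  · rw [if_neg hall]
    rw [if_neg (fun hlen => hall (List.all_eq_true.mpr (fun y hy =>
      List.takeWhile_eq_self_iff.mp
        ((List.takeWhile_sublist _).eq_of_length (by simpa using hlen))
        y (List.mem_reverse.mpr hy))))]

-- A's loop counts the leading good elements of its (reversed) input
lemma pvALoop_eq (max_len : Int) : ∀ (l : List String) (index : Int),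
    pvALoop max_len l index 0 = index - ((l.takeWhile (pvGood max_len)).length : Int) := by
  intro l
  induction l with
  | nil => intro index; simp [pvALoop]
  | cons x xs ih =>
      intro index
      by_cases h : PySem.Str.len x > max_len
      · have hb : pvGood max_len x = false := by simp [pvGood, PySem.Str.len] at h ⊢; omega
        simp only [pvALoop]
        rw [if_pos (by simpa [PySem.Str.len] using h)]
        simp [hb]
      · have hg : pvGood max_len x = true := by simp [pvGood, PySem.Str.len] at h ⊢; omega
        simp only [pvALoop]
        rw [if_neg (by simpa [PySem.Str.len] using h), ih (index - 1)]
        simp [hg]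
        omega

-- B's loop computes l.length - pvT l (the index after the last bad element), from any start offset
lemma pvBLoop_eq (max_len : Int) : ∀ (l : List String) (s a : Int),
    (PySem.List.enumerate l s).foldl
      (fun start p => if PySem.Str.len p.2 > max_len then p.1 + 1 else start) a
    = if l.all (pvGood max_len) = true then a
      else s + ((l.length - pvT max_len l : Nat) : Int) := by
  intro l
  induction l with
  | nil => intro s a; simp [PySem.List.enumerate]
  | cons x xs ih =>
      intro s a
      have hT : pvT max_len xs ≤ xs.length := pvT_le max_len xs
      rw [PySem.List.enumerate_cons, List.foldl_cons]
      by_cases h : PySem.Str.len x > max_len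
      · have hb : pvGood max_len x = false := by simp [pvGood, PySem.Str.len] at h ⊢; omega
        rw [if_pos h, ih (s + 1) (s + 1), pvT_cons]
        simp only [List.all_cons, hb, Bool.false_and, Bool.false_eq_true, if_false,
          List.length_cons, Nat.add_zero]
        by_cases hall : xs.all (pvGood max_len) = true
        · rw [if_pos hall, if_pos hall]; omega
        · rw [if_neg hall, if_neg hall]; omega
      · have hg : pvGood max_len x = true := by simp [pvGood, PySem.Str.len] at h ⊢; omega
        rw [if_neg h, ih (s + 1) a, pvT_cons]
        simp only [List.all_cons, hg, Bool.true_and, if_true, List.length_cons]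
        by_cases hall : xs.all (pvGood max_len) = true
        · simp [hall]
        · rw [if_neg hall, if_neg hall, if_neg hall]; omega

-- ===== VERDICT (by name: the statement is the Claim_ definition above) =====
theorem determine_header_py_spec : Claim_equal_determine_header_py := by
  intro namespace_ sep max_len _
  unfold Spec_determine_header_py determine_header_py determine_header_py_alt
  rw [PySem.List.slice_to_neg_one]
  set l := namespace_.dropLast with hl
  have hT : pvT max_len l ≤ l.length := pvT_le max_len l
  have hlen : l.length = namespace_.length - 1 := by simp [hl]
  have hA : pvALoop max_len l.reverse (-1) 0 = -1 - ((pvT max_len l : Nat) : Int) := by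
    rw [pvALoop_eq]; rfl
  have hB : (PySem.List.enumerate l).foldl
      (fun start p => if PySem.Str.len p.2 > max_len then p.1 + 1 else start) 0
      = ((l.length - pvT max_len l : Nat) : Int) := by
    rw [pvBLoop_eq]
    split_ifs with hall
    · rw [pvT_all max_len l hall]; simp
    · omega
  rw [hA, hB]
  congr 1
  have h1 : (-1 : Int) - ((pvT max_len l : Nat) : Int) = -(((pvT max_len l + 1 : Nat) : Int)) := by
    push_cast; ring
  rw [h1, PySem.List.slice_from_neg_natCast namespace_ (pvT max_len l + 1) (by omega),
      PySem.List.slice_from_natCast]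
  congr 1
  omega
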